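-- pv_equiv track=rewrite | github.com/tachyon83/code-rhino | DAY52-Programmers-기능개발/minji.py | solution
-- ===== SOURCE A (Python) =====
-- from collections import deque
--
-- def solution(pro, spe):
--     answer = []
--     time, cnt = 0, 0
--     p = deque(pro)
--     s = deque(spe)
--
--     while p:
--         if (p[0] + time*s[0]) >= 100:
--             p.popleft()
--             s.popleft()
--             cnt += 1
--         else:
--             if cnt > 0:
--                 answer.append(cnt)
--                 cnt = 0
--             time += 1
--     answer.append(cnt)
--     return answer
-- ===== SOURCE B (Python) =====
-- def solution(pro, spe):
--     days = [max(0, (100 - p + s - 1) // s) for p, s in zip(pro, spe)]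
--     if not days:
--         return [0]
--     answer = []
--     leader, cnt = days[0], 0
--     for d in days:
--         if d <= leader:
--             cnt += 1
--         else:
--             answer.append(cnt)
--             leader, cnt = d, 1
--     answer.append(cnt)
--     return answer
-- ===== Notes on version B (the rewrite author's own statement) =====
-- stated objective: simpler
-- what changed: B replaces A's day-by-day clock simulation over deques with a closed-form completion day per task (ceiling division) followed by a single grouping scan over that list.
-- outside the precondition, e.g. on solution([100], [0]): A returns [1], B raises ZeroDivisionError
import Mathlib
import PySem

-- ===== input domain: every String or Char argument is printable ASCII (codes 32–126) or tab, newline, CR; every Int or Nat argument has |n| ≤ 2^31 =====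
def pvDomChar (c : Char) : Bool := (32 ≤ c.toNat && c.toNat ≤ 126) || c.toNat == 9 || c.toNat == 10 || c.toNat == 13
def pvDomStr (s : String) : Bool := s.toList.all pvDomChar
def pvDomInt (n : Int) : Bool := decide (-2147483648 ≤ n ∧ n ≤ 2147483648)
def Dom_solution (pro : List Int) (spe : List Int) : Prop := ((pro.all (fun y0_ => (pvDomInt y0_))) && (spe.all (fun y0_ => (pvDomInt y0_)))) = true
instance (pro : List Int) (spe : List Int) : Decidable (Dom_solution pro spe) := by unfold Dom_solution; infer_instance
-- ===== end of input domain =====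

-- B replaces A's day-by-day clock simulation with closed-form per-task completion days
-- plus one grouping scan (objective: simpler).


-- ===== PORT A =====
-- A's while loop over the two deques; state = (p, s, time, cnt, answer).
-- The fuel parameter only makes the recursion total: inside Pre_solution the fuel
-- passed by `solution` is proved sufficient, so the fuel-exhaustion branch never runs
-- (Python diverges or raises only outside Pre_solution).
def loopA (fuel : Nat) (p s : List Int) (time cnt : Int) (answer : List Int) : List Int :=
  match p, s, fuel with
  | [], _, _ => answer ++ [cnt]
  | _ :: _, [], _ => answer ++ [cnt]      -- Python raises IndexError here; excluded by Pre_solution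
  | p0 :: pt, s0 :: st, Nat.succ fuel' =>
    if p0 + time * s0 ≥ 100 then loopA fuel' pt st time (cnt + 1) answer
    else if cnt > 0 then loopA fuel' (p0 :: pt) (s0 :: st) (time + 1) 0 (answer ++ [cnt])
    else loopA fuel' (p0 :: pt) (s0 :: st) (time + 1) cnt answer
  | _ :: _, _ :: _, 0 => answer ++ [cnt]  -- out of fuel; unreachable inside Pre_solution

def solution (pro : List Int) (spe : List Int) : List Int :=
  loopA (pro.length + (pro.map (fun x => (100 - x).toNat)).sum) pro spe 0 0 []

-- ===== PORT B =====
-- completion day of one task: max(0, (100 - p + s - 1) // s)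
def dayOf (p s : Int) : Int := max 0 (PySem.Int.floordiv (100 - p + s - 1) s)

-- B's grouping pass: leader / cnt / answer accumulator
def groupScan (ds : List Int) (leader cnt : Int) (answer : List Int) : List Int :=
  match ds with
  | [] => answer ++ [cnt]
  | d :: ds' =>
    if d ≤ leader then groupScan ds' leader (cnt + 1) answer
    else groupScan ds' d 1 (answer ++ [cnt])

def solution_alt (pro : List Int) (spe : List Int) : List Int :=
  let days := List.zipWith dayOf pro spe
  match days with
  | [] => [0]
  | d0 :: _ => groupScan days d0 0 []

-- ===== PRECONDITION & SPEC =====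
-- Pre_ excludes: spe shorter than pro (A raises IndexError), and non-positive speeds
-- among the first |pro| entries (A loops forever unless the task is already ≥ 100,
-- where B's ceiling division would divide by zero or use a negative divisor).
def Pre_solution (pro : List Int) (spe : List Int) : Prop :=
  pro.length ≤ spe.length ∧ ∀ x ∈ spe.take pro.length, 1 ≤ x
instance (pro : List Int) (spe : List Int) : Decidable (Pre_solution pro spe) := by
  unfold Pre_solution; infer_instance

def pvWitness_solution : List Int × List Int := ([93, 30, 55], [1, 30, 5])

def Spec_solution (pro : List Int) (spe : List Int) (out : List Int) : Prop := out = solution_alt pro spe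
instance (pro : List Int) (spe : List Int) (out : List Int) : Decidable (Spec_solution pro spe out) := by unfold Spec_solution; infer_instance

-- ===== CLAIM =====
def Claim_equal_solution : Prop := ∀ (pro : List Int) (spe : List Int),
  Dom_solution pro spe → Pre_solution pro spe → Spec_solution pro spe (solution pro spe)

-- ===== LEMMAS AND PROOFS =====

-- proof-only intermediate: the grouped run A performs, expressed on the days list
def G (ds : List Int) (t cnt : Int) (ans : List Int) : List Int :=
  match ds with
  | [] => ans ++ [cnt]
  | d :: ds' =>
    if d ≤ t then G ds' t (cnt + 1) ans
    else G ds' d 1 (if 0 < cnt then ans ++ [cnt] else ans)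

lemma dayOf_nonneg (p s : Int) : 0 ≤ dayOf p s := le_max_left _ _

lemma dayOf_le_iff (p s t : Int) (hs : 1 ≤ s) (ht : 0 ≤ t) :
    dayOf p s ≤ t ↔ 100 ≤ p + t * s := by
  unfold dayOf
  rw [max_le_iff]
  have h : PySem.Int.floordiv (100 - p + s - 1) s ≤ t ↔ 100 - p + s - 1 < (t + 1) * s := by
    rw [← Int.lt_add_one_iff, PySem.Int.floordiv_lt_iff_lt_mul (by omega)]
  rw [h, add_mul, one_mul]
  constructor
  · intro ⟨_, h2⟩; omega
  · intro h2; exact ⟨ht, by omega⟩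

lemma dayOf_le_bound (p s : Int) (hs : 1 ≤ s) : dayOf p s ≤ ((100 - p).toNat : Int) := by
  rw [dayOf_le_iff p s _ hs (by positivity)]
  nlinarith [Int.self_le_toNat (100 - p), Int.natCast_nonneg (n := (100 - p).toNat)]

lemma days_sum_bound : ∀ (p s : List Int), (∀ x ∈ s.take p.length, 1 ≤ x) →
    ((List.zipWith dayOf p s).map Int.toNat).sum ≤ (p.map (fun x => (100 - x).toNat)).sum := by
  intro p
  induction p with
  | nil => intro s _; simp
  | cons p0 pt ih =>
    intro s hs
    cases s with
    | nil => simp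
    | cons s0 st =>
      simp only [List.zipWith_cons_cons, List.map_cons, List.sum_cons]
      have h0 : (1 : Int) ≤ s0 := hs s0 (by simp)
      have h1 := dayOf_le_bound p0 s0 h0
      have h2 : (dayOf p0 s0).toNat ≤ (100 - p0).toNat := by omega
      have h3 := ih st (by intro x hx; exact hs x (by simp at hx ⊢; tauto))
      omega

lemma loopA_advance : ∀ (k fuel : Nat) (p0 s0 : Int) (pt st : List Int) (time cnt : Int)
    (ans : List Int), 0 ≤ cnt →
    (∀ j : Nat, j < k → p0 + (time + j) * s0 < 100) →
    loopA (fuel + k) (p0 :: pt) (s0 :: st) time cnt ans =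
      loopA fuel (p0 :: pt) (s0 :: st) (time + k) (if k = 0 then cnt else 0)
        (if k ≠ 0 ∧ 0 < cnt then ans ++ [cnt] else ans) := by
  intro k
  induction k with
  | zero => intro fuel p0 s0 pt st time cnt ans _ _; simp
  | succ k ih =>
    intro fuel p0 s0 pt st time cnt ans hcnt h
    have hc : ¬ (p0 + time * s0 ≥ 100) := by
      have := h 0 (by omega); simpa using this
    have hstep : fuel + (k + 1) = (fuel + k) + 1 := by omega
    rw [hstep]
    by_cases hcp : cnt > 0
    · simp only [loopA, if_neg hc, if_pos hcp]
      rw [ih fuel p0 s0 pt st (time + 1) 0 (ans ++ [cnt]) le_rfl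
        (by intro j hj; have := h (j + 1) (by omega); push_cast at this ⊢; linarith)]
      have ht : time + 1 + (k : Int) = time + ((k : Nat) + 1 : Nat) := by push_cast; ring
      rw [ht]
      rcases Nat.eq_zero_or_pos k with hk | hk
      · subst hk; simp [hcp]
      · simp only [if_neg (by omega : ¬ k = 0), if_neg (by omega : ¬ (k:Nat) + 1 = 0)]
        simp [hcp]
    · have hc0 : cnt = 0 := by omega
      subst hc0
      simp only [loopA, if_neg hc, if_neg hcp]
      rw [ih fuel p0 s0 pt st (time + 1) 0 ans le_rfl
        (by intro j hj; have := h (j + 1) (by omega); push_cast at this ⊢; linarith)]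
      have ht : time + 1 + (k : Int) = time + ((k : Nat) + 1 : Nat) := by push_cast; ring
      rw [ht]
      rcases Nat.eq_zero_or_pos k with hk | hk
      · subst hk; simp
      · simp

lemma loopA_eq_G : ∀ (p s : List Int) (time cnt : Int) (ans : List Int) (fuel : Nat),
    p.length ≤ s.length →
    (∀ x ∈ s.take p.length, 1 ≤ x) →
    0 ≤ time → 0 ≤ cnt →
    p.length + ((List.zipWith dayOf p s).map Int.toNat).sum ≤ fuel →
    loopA fuel p s time cnt ans = G (List.zipWith dayOf p s) time cnt ans := by
  intro p
  induction p with
  | nil =>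
    intro s time cnt ans fuel _ _ _ _ _
    cases s <;> cases fuel <;> simp [loopA, G]
  | cons p0 pt ih =>
    intro s time cnt ans fuel hlen hs ht hcnt hfuel
    cases s with
    | nil => simp at hlen
    | cons s0 st =>
      have hs0 : (1 : Int) ≤ s0 := hs s0 (by simp)
      have hst : ∀ x ∈ st.take pt.length, 1 ≤ x := by
        intro x hx; exact hs x (by simp at hx ⊢; tauto)
      have hd0 : 0 ≤ dayOf p0 s0 := dayOf_nonneg p0 s0
      simp only [List.zipWith_cons_cons, List.map_cons, List.sum_cons, List.length_cons] at hfuel ⊢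
      by_cases hle : dayOf p0 s0 ≤ time
      · -- pops immediately
        have hcond : p0 + time * s0 ≥ 100 := (dayOf_le_iff p0 s0 time hs0 ht).mp hle
        obtain ⟨f, rfl⟩ : ∃ f, fuel = f + 1 := ⟨fuel - 1, by omega⟩
        simp only [loopA, if_pos hcond]
        rw [ih st time (cnt + 1) ans f (by simpa using hlen) hst ht (by omega) (by omega)]
        rw [G, if_pos hle]
      · -- advance time to dayOf p0 s0, then pop
        set d := dayOf p0 s0 with hdd
        have htd : time < d := by omega
        set k : Nat := (d - time).toNat with hk
        have hkd : (k : Int) = d - time := by omega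
        have hkfuel : k ≤ fuel := by omega
        obtain ⟨f, rfl⟩ : ∃ f, fuel = f + k := ⟨fuel - k, by omega⟩
        rw [loopA_advance k f p0 s0 pt st time cnt ans hcnt
          (by intro j hj
              have hjd : time + (j : Int) < d := by omega
              have := (dayOf_le_iff p0 s0 (time + j) hs0 (by positivity)).not.mp (by omega)
              omega)]
        have hkne : ¬ k = 0 := by omega
        simp only [if_neg hkne]
        have htk : time + (k : Int) = d := by omega
        rw [htk]
        have hcond : p0 + d * s0 ≥ 100 := (dayOf_le_iff p0 s0 d hs0 hd0).mp le_rfl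
        obtain ⟨f', rfl⟩ : ∃ f', f = f' + 1 := ⟨f - 1, by omega⟩
        simp only [loopA, if_pos hcond, zero_add]
        rw [ih st d 1 _ f' (by simpa using hlen) hst hd0 (by omega) (by omega)]
        rw [G, if_neg hle]
        congr 1
        simp [hkne]

lemma G_eq_groupScan : ∀ (ds : List Int) (t cnt : Int) (ans : List Int), 0 < cnt →
    G ds t cnt ans = groupScan ds t cnt ans := by
  intro ds
  induction ds with
  | nil => intro t cnt ans _; simp [G, groupScan]
  | cons d ds' ih =>
    intro t cnt ans hcnt
    rw [G, groupScan]
    by_cases hle : d ≤ t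
    · rw [if_pos hle, if_pos hle, ih _ _ _ (by omega)]
    · rw [if_neg hle, if_neg hle, if_pos hcnt, ih _ _ _ (by omega)]

lemma zip_dayOf_nonneg : ∀ (p s : List Int), ∀ x ∈ List.zipWith dayOf p s, 0 ≤ x := by
  intro p
  induction p with
  | nil => intro s x hx; simp at hx
  | cons p0 pt ih =>
    intro s x hx
    cases s with
    | nil => simp at hx
    | cons s0 st =>
      simp only [List.zipWith_cons_cons, List.mem_cons] at hx
      rcases hx with rfl | hx
      · exact dayOf_nonneg p0 s0
      · exact ih st x hx

-- ===== VERDICT =====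
theorem solution_spec : Claim_equal_solution := by
  intro pro spe _ hpre
  obtain ⟨hlen, hs⟩ := hpre
  unfold Spec_solution solution solution_alt
  rw [loopA_eq_G pro spe 0 0 [] _ hlen hs le_rfl le_rfl
    (by have := days_sum_bound pro spe hs; omega)]
  cases hzip : List.zipWith dayOf pro spe with
  | nil => simp [G]
  | cons d0 rest =>
    simp only
    have hd0 : 0 ≤ d0 := zip_dayOf_nonneg pro spe d0 (by rw [hzip]; simp)
    rw [G]
    by_cases h0 : d0 ≤ 0
    · have : d0 = 0 := le_antisymm h0 hd0
      subst this
      rw [if_pos le_rfl, groupScan, if_pos le_rfl]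
      exact G_eq_groupScan _ _ _ _ (by omega)
    · rw [if_neg h0, if_neg (by omega : ¬ (0:Int) < 0), groupScan, if_pos le_rfl]
      exact G_eq_groupScan _ _ _ _ (by omega)
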